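-- pv_equiv track=rewrite | github.com/ameenclick/Language-Modeling | language.py | countStartWords
-- ===== SOURCE A (Python) =====
-- def getStartWords(corpus):
--     startWords=[]
--     for eachLine in corpus:
--         if(eachLine[0] not in startWords):
--             startWords.append(eachLine[0])
--     return startWords
--
-- def countStartWords(corpus):
--     startWords=getStartWords(corpus)
--     count={}
--     for line in corpus:
--         if(line[0] in startWords):
--             if line[0] not in count:
--                 count[line[0]]=0
--             count[line[0]] += 1
--     return count
-- ===== SOURCE B (Python) =====
-- def countStartWords(corpus):
--     # Collect every line's first word once, then give each distinct first word
--     # (in first-occurrence order) its total count via list.count -- no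
--     # distinct-word prepass and no increment loop.
--     words = [line[0] for line in corpus]
--     count = {}
--     for w in words:
--         if w not in count:
--             count[w] = words.count(w)
--     return count
-- ===== Notes on version B (the rewrite author's own statement) =====
-- stated objective: simpler
-- what changed: Drops A's distinct-word prepass and per-occurrence increment loop; B extracts the first words once and assigns each distinct word its total via a single list.count call at its first occurrence.
import Mathlib
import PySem

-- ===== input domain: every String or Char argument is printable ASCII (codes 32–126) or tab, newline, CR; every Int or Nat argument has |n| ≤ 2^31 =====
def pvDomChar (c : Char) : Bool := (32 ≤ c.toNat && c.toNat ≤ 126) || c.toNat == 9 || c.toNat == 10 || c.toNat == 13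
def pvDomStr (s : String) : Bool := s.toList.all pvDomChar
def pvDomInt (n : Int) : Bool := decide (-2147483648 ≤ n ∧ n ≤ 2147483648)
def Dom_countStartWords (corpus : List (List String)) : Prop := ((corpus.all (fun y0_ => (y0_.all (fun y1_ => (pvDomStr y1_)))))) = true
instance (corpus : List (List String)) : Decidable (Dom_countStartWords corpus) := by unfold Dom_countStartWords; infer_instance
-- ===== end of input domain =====

-- ===== PORT A =====
-- B replaces A's distinct-word prepass + increment loop by one pass assigning each
-- distinct first word its total list.count at its first occurrence (objective: simpler).
-- `line[0]`: Python raises IndexError on an empty line; Pre_ excludes corpora with an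
-- empty line, so the `.getD ""` default is never reached inside Pre_.
def pvHead (line : List String) : String := (PySem.List.pyGet? line 0).getD ""

def countStartWords (corpus : List (List String)) : List (String × Int) :=
  let startWords : List String :=
    corpus.foldl (fun sw line =>
      if sw.contains (pvHead line) then sw else sw ++ [pvHead line]) []
  let count : PySem.Dict String Int :=
    corpus.foldl (fun d line =>
      if startWords.contains (pvHead line) then
        let d' := if d.contains (pvHead line) = false then d.insert (pvHead line) 0 else d
        d'.modify (pvHead line) 0 (· + 1)
      else d) PySem.Dict.empty
  count.items

-- ===== PORT B =====
def countStartWords_alt (corpus : List (List String)) : List (String × Int) :=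
  let words : List String := corpus.map pvHead
  let count : PySem.Dict String Int :=
    words.foldl (fun d w =>
      if d.contains w = false then d.insert w ((words.count w : Int)) else d)
      PySem.Dict.empty
  count.items

-- ===== PRECONDITION & SPEC =====
-- Pre_ excludes exactly the corpora containing an empty line: there Python A raises IndexError on line[0].
def Pre_countStartWords (corpus : List (List String)) : Prop := ∀ line ∈ corpus, line ≠ []
instance (corpus : List (List String)) : Decidable (Pre_countStartWords corpus) := by
  unfold Pre_countStartWords; infer_instance
def pvWitness_countStartWords : List (List String) := [["the", "cat"], ["a", "dog"], ["the"]]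
def Spec_countStartWords (corpus : List (List String)) (out : List (String × Int)) : Prop := out = countStartWords_alt corpus
instance (corpus : List (List String)) (out : List (String × Int)) : Decidable (Spec_countStartWords corpus out) := by unfold Spec_countStartWords; infer_instance

-- ===== CLAIM (what is proved, stated in full; the proofs are below) =====
def Claim_equal_countStartWords : Prop := ∀ (corpus : List (List String)), Dom_countStartWords corpus → Pre_countStartWords corpus → Spec_countStartWords corpus (countStartWords corpus)

-- ===== LEMMAS AND PROOFS =====

-- A's startWords fold is PySem.Set.ofList of the first words.
theorem pv_startWords_eq (corpus : List (List String)) :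
    corpus.foldl (fun sw line =>
      if sw.contains (pvHead line) then sw else sw ++ [pvHead line]) [] =
    PySem.Set.ofList (corpus.map pvHead) := by
  rw [PySem.Set.ofList, List.foldl_map]
  rfl

-- insert-0-then-increment equals a plain counter step.
theorem pv_stepA_eq (d : PySem.Dict String Int) (h : String) :
    (if d.contains h = false then d.insert h 0 else d).modify h 0 (· + 1) =
    d.modify h 0 (· + 1) := by
  by_cases hc : d.contains h = false
  · rw [if_pos hc, PySem.Dict.modify, PySem.Dict.modify, PySem.Dict.getD_insert_self,
      PySem.Dict.insert_insert_self, PySem.Dict.getD_of_not_contains d 0 hc]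
  · rw [if_neg hc]

-- A's count dict is Counter(words).
theorem pv_countA_eq (corpus : List (List String)) :
    (corpus.foldl (fun d line =>
      if List.contains (PySem.Set.ofList (corpus.map pvHead)) (pvHead line) then
        (if d.contains (pvHead line) = false then d.insert (pvHead line) 0 else d).modify (pvHead line) 0 (· + 1)
      else d) PySem.Dict.empty) =
    PySem.Dict.counter (corpus.map pvHead) := by
  rw [PySem.Dict.counter_eq_foldl, List.foldl_map]
  apply PySem.List.foldl_congr_mem
  intro acc line hline
  have hmem : pvHead line ∈ PySem.Set.ofList (corpus.map pvHead) := by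
    rw [PySem.Set.mem_ofList]
    exact List.mem_map_of_mem hline
  rw [if_pos (by simpa using hmem), pv_stepA_eq]

-- B's fold: value at any key, from any start dict.
theorem pv_getD_B (f : String → Int) (l : List String) (d : PySem.Dict String Int) (k : String) :
    (l.foldl (fun d w => if d.contains w = false then d.insert w (f w) else d) d).getD k 0 =
    if d.contains k = true then d.getD k 0 else if k ∈ l then f k else 0 := by
  induction l generalizing d with
  | nil =>
    by_cases hc : d.contains k = true
    · simp [hc]
    · have hc' : d.contains k = false := by simpa using hc
      simp [hc', PySem.Dict.getD_of_not_contains d 0 hc']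
  | cons x l ih =>
    simp only [List.foldl_cons]
    by_cases hx : d.contains x = false
    · rw [if_pos hx, ih]
      by_cases hk : k = x
      · subst hk
        simp [PySem.Dict.getD_insert_self, hx]
      · rw [PySem.Dict.contains_insert, PySem.Dict.getD_insert d x k (f x) 0]
        simp [hk]
    · have hx' : d.contains x = true := by simpa using hx
      rw [if_neg (by simp [hx']), ih]
      by_cases hk : k = x
      · subst hk; simp [hx']
      · simp [hk]

-- B's fold: keys, from any start dict.
theorem pv_keys_B (f : String → Int) (l : List String) (d : PySem.Dict String Int) :
    (l.foldl (fun d w => if d.contains w = false then d.insert w (f w) else d) d).keys =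
    l.foldl PySem.Set.add d.keys := by
  induction l generalizing d with
  | nil => rfl
  | cons x l ih =>
    simp only [List.foldl_cons]
    have hck : d.contains x = List.contains d.keys x := by
      by_cases hm : x ∈ d.keys
      · have h1 := (PySem.Dict.contains_iff_mem_keys d x).mpr hm
        simp [h1, hm]
      · have h1 : d.contains x = false := by
          by_contra hcon
          exact hm ((PySem.Dict.contains_iff_mem_keys d x).mp (by simpa using hcon))
        simp [h1, hm]
    by_cases hx : d.contains x = false
    · rw [if_pos hx, ih, PySem.Dict.keys_insert_of_not_contains d (f x) hx,
        PySem.Set.add, PySem.Set.contains, if_neg (by rw [← hck, hx]; simp)]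
    · have hx' : d.contains x = true := by simpa using hx
      rw [if_neg (by simp [hx']), ih, PySem.Set.add, PySem.Set.contains,
        if_pos (by rw [← hck, hx'])]

-- B's dict from empty: keys are the distinct first words in order.
theorem pv_keysB_ofList (f : String → Int) (l : List String) :
    (l.foldl (fun d w => if d.contains w = false then d.insert w (f w) else d)
      (PySem.Dict.empty : PySem.Dict String Int)).keys = PySem.Set.ofList l := by
  rw [pv_keys_B]
  rfl

-- ===== VERDICT (by name: the statement is the Claim_ definition above) =====
theorem countStartWords_spec : Claim_equal_countStartWords := by
  intro corpus _ _
  unfold Spec_countStartWords countStartWords countStartWords_alt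
  simp only []
  rw [pv_startWords_eq, pv_countA_eq, PySem.Dict.items_counter]
  set words := corpus.map pvHead with hw
  set f : String → Int := fun w => (words.count w : Int) with hf
  have hnd : (words.foldl (fun d w => if d.contains w = false then d.insert w (f w) else d)
      (PySem.Dict.empty : PySem.Dict String Int)).keys.Nodup := by
    rw [pv_keysB_ofList]
    exact PySem.Set.nodup_ofList words
  rw [PySem.Dict.items_eq_map_keys _ hnd 0, pv_keysB_ofList]
  apply List.map_congr_left
  intro k hk
  have hkw : k ∈ words := (PySem.Set.mem_ofList words k).mp hk
  rw [pv_getD_B, if_neg (by simp), if_pos hkw]
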